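-- pv_equiv track=rewrite | github.com/marceloalcocer/adventofcode | 2023/09/aoc.py | backcast
-- ===== SOURCE A (Python) =====
-- def diff(iterable):
-- 	for current, next_ in zip(
-- 		iterable[0:-1],
-- 		iterable[1:]
-- 	):
-- 		yield next_ - current
--
-- def diffs(iterable):
-- 	while any(iterable):
-- 		yield iterable
-- 		iterable = list(diff(iterable))
--
-- def backcast(iterable):
-- 	extrapolated_value = 0
-- 	for difference in reversed(
-- 		[
-- 			differences[0]
-- 			for differences in
-- 			diffs(iterable)
-- 		]
-- 	):
-- 		extrapolated_value = difference - extrapolated_value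
-- 	return extrapolated_value
-- ===== SOURCE B (Python) =====
-- def backcast(iterable):
-- 	# Newton backward extrapolation: result = sum_j (-1)^j * C(n, j+1) * x_j,
-- 	# with the binomial coefficient updated iteratively in one O(n) pass.
-- 	values = list(iterable)
-- 	n = len(values)
-- 	total = 0
-- 	c = n  # C(n, 1)
-- 	sign = 1
-- 	for j, v in enumerate(values):
-- 		total += sign * c * v
-- 		c = c * (n - j - 1) // (j + 2)  # C(n, j+2)
-- 		sign = -sign
-- 	return total
-- ===== Notes on version B (the rewrite author's own statement) =====
-- stated objective: faster
-- what changed: Replaces A's repeated construction of whole difference rows (while any(row): row = diffs) plus a reversed fold by the closed-form Newton backward-difference formula sum_j (-1)^j * C(n, j+1) * x_j, computed in a single pass with an iteratively updated binomial coefficient.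
import Mathlib
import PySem

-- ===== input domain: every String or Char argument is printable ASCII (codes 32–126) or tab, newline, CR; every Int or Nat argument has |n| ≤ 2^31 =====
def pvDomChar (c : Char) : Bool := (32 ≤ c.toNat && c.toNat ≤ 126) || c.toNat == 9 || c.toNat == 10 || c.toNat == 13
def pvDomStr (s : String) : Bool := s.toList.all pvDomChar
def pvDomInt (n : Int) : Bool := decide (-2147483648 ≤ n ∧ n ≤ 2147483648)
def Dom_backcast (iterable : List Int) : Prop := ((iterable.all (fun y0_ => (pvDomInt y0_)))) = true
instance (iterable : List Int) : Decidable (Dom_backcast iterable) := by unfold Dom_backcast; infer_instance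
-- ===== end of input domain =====

-- B replaces A's O(n^2) repeated difference-table construction by the closed-form
-- Newton signed-binomial combination of the inputs, computed in one O(n) pass.

-- ===== PORT A =====
-- def diff(iterable): yields next_ - current over zip(iterable[0:-1], iterable[1:])
def pyDiff (iterable : List Int) : List Int :=
  (List.zip (PySem.List.slice iterable (some 0) (some (-1)))
            (PySem.List.slice iterable (some 1) none)).map (fun p => p.2 - p.1)

theorem length_pyDiff (xs : List Int) : (pyDiff xs).length = xs.length - 1 := by
  simp [pyDiff, PySem.List.slice_from_one, PySem.List.slice_to_neg_one]

-- diffs(iterable) fused with the comprehension [differences[0] for differences in diffs(iterable)]: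
-- while any(iterable): collect iterable[0]; iterable = list(diff(iterable)).
-- differences[0] cannot raise: any(differences) holds, so we read the head (headD is exact here).
def firstsAux (xs : List Int) : List Int :=
  if xs.any (fun v => v != 0) then xs.headD 0 :: firstsAux (pyDiff xs) else []
termination_by xs.length
decreasing_by
  rename_i h
  have hne : xs ≠ [] := by rintro rfl; simp at h
  have hl := length_pyDiff xs
  have hp : 0 < xs.length := List.length_pos_iff.mpr hne
  omega

def backcast (iterable : List Int) : Int :=
  -- extrapolated_value = 0; for difference in reversed(firsts): extrapolated_value = difference - extrapolated_value
  ((firstsAux iterable).reverse).foldl (fun e d => d - e) 0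

-- ===== PORT B =====
-- one pass over enumerate(values) with state (total, c, sign); c tracks C(n, j+1)
def bStep (n : Int) (st : Int × Int × Int) (jv : Int × Int) : Int × Int × Int :=
  (st.1 + st.2.2 * st.2.1 * jv.2,
   PySem.Int.floordiv (st.2.1 * (n - jv.1 - 1)) (jv.1 + 2),
   -st.2.2)

def backcast_alt (iterable : List Int) : Int :=
  let values := iterable
  let n : Int := values.length
  ((PySem.List.enumerate values 0).foldl (bStep n) (0, n, 1)).1

-- ===== PRECONDITION & SPEC =====
def Spec_backcast (iterable : List Int) (out : Int) : Prop := out = backcast_alt iterable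
instance (iterable : List Int) (out : Int) : Decidable (Spec_backcast iterable out) := by unfold Spec_backcast; infer_instance

-- ===== CLAIM (what is proved, stated in full; the proofs are below) =====
def Claim_equal_backcast : Prop := ∀ (iterable : List Int), Dom_backcast iterable → Spec_backcast iterable (backcast iterable)

-- ===== LEMMAS AND PROOFS =====

-- the common closed form: S xs = Σ_{j<n} (-1)^j C(n, j+1) xs_j
def Sform (xs : List Int) : Int :=
  ∑ j ∈ Finset.range xs.length, (-1 : Int) ^ j * (xs.length.choose (j + 1) : Int) * xs.getD j 0

theorem pyDiff_zero (xs : List Int) (h : ∀ v ∈ xs, v = 0) : ∀ v ∈ pyDiff xs, v = 0 := by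
  intro v hv
  simp only [pyDiff, List.mem_map] at hv
  obtain ⟨p, hp, rfl⟩ := hv
  have h1 := (List.of_mem_zip hp).1
  have h2 := (List.of_mem_zip hp).2
  have := h p.1 (PySem.List.mem_of_mem_slice xs _ _ h1)
  have := h p.2 (PySem.List.mem_of_mem_slice xs _ _ h2)
  omega

-- full-depth recursion (no early stop)
def Wfull (xs : List Int) : Int :=
  match xs with
  | [] => 0
  | x :: t => x - Wfull (pyDiff (x :: t))
termination_by xs.length
decreasing_by
  simp only [length_pyDiff, List.length_cons]; omega

theorem Wfull_zero (xs : List Int) (h : ∀ v ∈ xs, v = 0) : Wfull xs = 0 := by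
  match hx : xs with
  | [] => simp [Wfull]
  | x :: t =>
    have hx0 : x = 0 := h x (by simp)
    have ih := Wfull_zero (pyDiff (x :: t)) (pyDiff_zero _ h)
    rw [Wfull, ih, hx0]; ring
termination_by xs.length
decreasing_by
  simp only [length_pyDiff, List.length_cons]; omega

theorem firstsAux_foldr (xs : List Int) :
    (firstsAux xs).foldr (fun d e => d - e) 0 = Wfull xs := by
  rw [firstsAux]
  split
  · rename_i h
    match xs, h with
    | x :: t, h =>
      have ih := firstsAux_foldr (pyDiff (x :: t))
      conv_rhs => rw [Wfull]
      simp [ih]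
  · rename_i h
    have hz : ∀ v ∈ xs, v = 0 := by
      intro v hv
      by_contra hvne
      exact h (List.any_eq_true.mpr ⟨v, hv, by simpa using hvne⟩)
    rw [Wfull_zero xs hz]; simp
termination_by xs.length
decreasing_by
  simp only [length_pyDiff, List.length_cons]; omega

theorem getD_pyDiff (xs : List Int) (j : Nat) (hj : j + 1 < xs.length) :
    (pyDiff xs).getD j 0 = xs.getD (j + 1) 0 - xs.getD j 0 := by
  have hlen : (pyDiff xs).length = xs.length - 1 := length_pyDiff xs
  have hj' : j < (pyDiff xs).length := by omega
  rw [List.getD_eq_getElem _ _ hj', List.getD_eq_getElem _ _ hj,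
      List.getD_eq_getElem _ _ (by omega : j < xs.length)]
  simp [pyDiff, PySem.List.slice_from_one, PySem.List.slice_to_neg_one,
        List.getElem_zip, List.getElem_dropLast, List.getElem_tail]

-- Newton's identity, one level: Σ_{j<m+1} (-1)^j C(m+1,j+1) f j = f 0 - Σ_{j<m} (-1)^j C(m,j+1) (f(j+1)-f j)
theorem key_sum (m : Nat) (f : Nat → Int) :
    ∑ j ∈ Finset.range (m + 1), (-1 : Int) ^ j * ((m + 1).choose (j + 1) : Int) * f j
      = f 0 - ∑ j ∈ Finset.range m, (-1 : Int) ^ j * (m.choose (j + 1) : Int) * (f (j + 1) - f j) := by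
  cases m with
  | zero => simp
  | succ m' =>
    rw [Finset.sum_range_succ' (fun j => (-1 : Int) ^ j * ((m' + 1 + 1).choose (j + 1) : Int) * f j) (m' + 1)]
    have hsplit : ∑ j ∈ Finset.range (m' + 1), (-1 : Int) ^ j * ((m' + 1).choose (j + 1) : Int) * (f (j + 1) - f j)
        = (∑ j ∈ Finset.range (m' + 1), (-1 : Int) ^ j * ((m' + 1).choose (j + 1) : Int) * f (j + 1))
          - (∑ j ∈ Finset.range (m' + 1), (-1 : Int) ^ j * ((m' + 1).choose (j + 1) : Int) * f j) := by
      rw [← Finset.sum_sub_distrib]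
      exact Finset.sum_congr rfl fun j _ => by ring
    have hB : ∑ j ∈ Finset.range (m' + 1), (-1 : Int) ^ j * ((m' + 1).choose (j + 1) : Int) * f j
        = (∑ i ∈ Finset.range m', (-1 : Int) ^ (i + 1) * ((m' + 1).choose (i + 1 + 1) : Int) * f (i + 1))
          + (-1 : Int) ^ 0 * ((m' + 1).choose (0 + 1) : Int) * f 0 :=
      Finset.sum_range_succ' (fun j => (-1 : Int) ^ j * ((m' + 1).choose (j + 1) : Int) * f j) m'
    have hext : ∑ i ∈ Finset.range (m' + 1), (-1 : Int) ^ (i + 1) * ((m' + 1).choose (i + 1 + 1) : Int) * f (i + 1)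
        = ∑ i ∈ Finset.range m', (-1 : Int) ^ (i + 1) * ((m' + 1).choose (i + 1 + 1) : Int) * f (i + 1) := by
      rw [Finset.sum_range_succ]
      simp
    have hpascal : ∑ i ∈ Finset.range (m' + 1), (-1 : Int) ^ (i + 1) * ((m' + 1 + 1).choose (i + 1 + 1) : Int) * f (i + 1)
        = (∑ i ∈ Finset.range (m' + 1), (-1 : Int) ^ (i + 1) * ((m' + 1).choose (i + 1 + 1) : Int) * f (i + 1))
          - (∑ i ∈ Finset.range (m' + 1), (-1 : Int) ^ i * ((m' + 1).choose (i + 1) : Int) * f (i + 1)) := by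
      rw [← Finset.sum_sub_distrib]
      refine Finset.sum_congr rfl fun i _ => ?_
      have hp : (((m' + 1) + 1).choose ((i + 1) + 1) : Int)
          = ((m' + 1).choose (i + 1) : Int) + ((m' + 1).choose ((i + 1) + 1) : Int) := by
        rw [← Nat.cast_add, ← Nat.choose_succ_succ]
      rw [hp]; ring
    rw [hpascal, hsplit, hB, ← hext]
    simp only [pow_zero, one_mul, Nat.zero_add, Nat.choose_one_right]
    push_cast
    ring

theorem Sform_cons (x : Int) (t : List Int) : Sform (x :: t) = x - Sform (pyDiff (x :: t)) := by
  have hd : (pyDiff (x :: t)).length = t.length := by rw [length_pyDiff]; simp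
  have hSd : Sform (pyDiff (x :: t))
      = ∑ j ∈ Finset.range t.length, (-1 : Int) ^ j * (t.length.choose (j + 1) : Int)
          * ((x :: t).getD (j + 1) 0 - (x :: t).getD j 0) := by
    rw [Sform, hd]
    refine Finset.sum_congr rfl fun j hj => ?_
    rw [getD_pyDiff (x :: t) j (by simp only [Finset.mem_range] at hj; simp; omega)]
  have hk := key_sum t.length (fun j => (x :: t).getD j 0)
  simp only [] at hk
  have hS : Sform (x :: t)
      = ∑ j ∈ Finset.range (t.length + 1), (-1 : Int) ^ j * ((t.length + 1).choose (j + 1) : Int)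
          * (x :: t).getD j 0 := by
    rw [Sform]; simp
  rw [hS, hk, hSd]
  simp

theorem Wfull_eq_Sform (xs : List Int) : Wfull xs = Sform xs := by
  match xs with
  | [] => simp [Wfull, Sform]
  | x :: t =>
    have ih := Wfull_eq_Sform (pyDiff (x :: t))
    rw [Wfull, ih, ← Sform_cons]
termination_by xs.length
decreasing_by simp only [length_pyDiff, List.length_cons]; omega

theorem choose_floordiv (n j : Nat) :
    PySem.Int.floordiv ((n.choose (j + 1) : Int) * ((n : Int) - (j : Int) - 1)) ((j : Int) + 2)
      = (n.choose (j + 2) : Int) := by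
  have hkey : (n.choose (j + 1) : Int) * ((n : Int) - (j : Int) - 1)
      = (n.choose (j + 2) : Int) * ((j : Int) + 2) := by
    by_cases h : j + 1 ≤ n
    · have h1 := congrArg (Nat.cast : Nat → Int) (Nat.choose_succ_right_eq n (j + 1))
      push_cast [Nat.cast_sub h] at h1
      linear_combination -h1
    · have h1 : n.choose (j + 1) = 0 := Nat.choose_eq_zero_of_lt (by omega)
      have h2 : n.choose (j + 2) = 0 := Nat.choose_eq_zero_of_lt (by omega)
      simp [h1, h2]
  rw [hkey]
  have hne : ((j : Int) + 2) ≠ 0 := by omega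
  simp only [PySem.Int.floordiv]
  exact Int.mul_fdiv_cancel _ hne

theorem bStep_invariant (n : Nat) (t : List Int) (j0 : Nat) (T : Int) :
    ((PySem.List.enumerate t (j0 : Int)).foldl (bStep (n : Int))
        (T, (n.choose (j0 + 1) : Int), (-1 : Int) ^ j0)).1
      = T + ∑ k ∈ Finset.range t.length,
          (-1 : Int) ^ (j0 + k) * (n.choose (j0 + k + 1) : Int) * t.getD k 0 := by
  induction t generalizing j0 T with
  | nil => simp [PySem.List.enumerate]
  | cons v t ih =>
    rw [PySem.List.enumerate_cons, List.foldl_cons]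
    have hstep : bStep (n : Int) (T, (n.choose (j0 + 1) : Int), (-1 : Int) ^ j0) ((j0 : Int), v)
        = (T + (-1 : Int) ^ j0 * (n.choose (j0 + 1) : Int) * v,
           (n.choose (j0 + 2) : Int), (-1 : Int) ^ (j0 + 1)) := by
      simp only [bStep]
      refine Prod.ext rfl (Prod.ext ?_ ?_)
      · exact choose_floordiv n j0
      · simp [pow_succ]
    rw [hstep]
    have hcast : ((j0 : Int) + 1) = (((j0 + 1 : Nat)) : Int) := by push_cast; ring
    rw [hcast, ih (j0 + 1) (T + (-1 : Int) ^ j0 * (n.choose (j0 + 1) : Int) * v)]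
    simp only [List.length_cons]
    rw [Finset.sum_range_succ'
      (fun k => (-1 : Int) ^ (j0 + k) * (n.choose (j0 + k + 1) : Int) * (v :: t).getD k 0) t.length]
    have hcongr : ∑ k ∈ Finset.range t.length,
          (-1 : Int) ^ (j0 + 1 + k) * (n.choose (j0 + 1 + k + 1) : Int) * t.getD k 0
        = ∑ i ∈ Finset.range t.length,
          (-1 : Int) ^ (j0 + (i + 1)) * (n.choose (j0 + (i + 1) + 1) : Int) * (v :: t).getD (i + 1) 0 := by
      refine Finset.sum_congr rfl fun i _ => ?_
      rw [show j0 + 1 + i = j0 + (i + 1) from by omega]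
      simp
    rw [hcongr]
    simp
    ring

theorem alt_eq_Sform (xs : List Int) : backcast_alt xs = Sform xs := by
  have h := bStep_invariant xs.length xs 0 0
  simp only [Nat.choose_one_right, pow_zero, Nat.cast_zero, zero_add] at h
  simp only [backcast_alt]
  rw [h, Sform]

-- ===== VERDICT (by name: the statement is the Claim_ definition above) =====
theorem backcast_spec : Claim_equal_backcast := by
  intro xs _
  show backcast xs = backcast_alt xs
  rw [backcast, List.foldl_reverse]
  rw [firstsAux_foldr xs, Wfull_eq_Sform, ← alt_eq_Sform]
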